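-- pv_equiv track=rewrite | github.com/g3rd/Expo | expo/slides/templatetags/utils.py | _template_expressions
-- ===== SOURCE A (Python) =====
-- def _template_expressions(bits):
--     extra_index = len(bits)
--     keyword_indexes = []
--     for keyword in ['with', 'only']:
--         try:
--             keyword_indexes.append(bits.index(keyword))
--         except ValueError:
--             pass
--     if keyword_indexes:
--         extra_index = min(keyword_indexes)
--     return bits[1:extra_index], extra_index
-- ===== SOURCE B (Python) =====
-- def _template_expressions(bits):
--     # Build the prefix of bits that precedes the first 'with'/'only' keyword;
--     # the answer is that prefix minus its first element, and its length.
--     head = []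
--     for bit in bits:
--         if bit in ('with', 'only'):
--             break
--         head.append(bit)
--     return head[1:], len(head)
-- ===== Notes on version B (the rewrite author's own statement) =====
-- stated objective: simpler
-- what changed: Instead of locating keyword indexes with two list.index scans plus min() and then slicing the original list, B accumulates the prefix of bits before the first 'with'/'only' and derives both outputs from that prefix (head[1:] and len(head)), computing no index at all.
import Mathlib
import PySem

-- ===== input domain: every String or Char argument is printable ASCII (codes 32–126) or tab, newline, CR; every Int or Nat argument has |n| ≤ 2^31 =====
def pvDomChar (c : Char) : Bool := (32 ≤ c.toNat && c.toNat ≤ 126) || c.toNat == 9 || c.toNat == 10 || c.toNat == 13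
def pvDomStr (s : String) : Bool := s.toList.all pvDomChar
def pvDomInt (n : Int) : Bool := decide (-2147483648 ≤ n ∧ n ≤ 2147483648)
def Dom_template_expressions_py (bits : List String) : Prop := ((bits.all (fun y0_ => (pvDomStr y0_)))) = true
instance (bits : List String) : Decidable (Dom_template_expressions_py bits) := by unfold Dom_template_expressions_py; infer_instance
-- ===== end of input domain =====

-- B replaces A's two list.index scans + min() + slice-of-original with a single pass that accumulates the prefix before the first 'with'/'only' and reads both outputs off that prefix; objective: simpler.


-- ===== PORT A =====
def template_expressions_py (bits : List String) : List String × Int :=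
  let keyword_indexes : List Nat :=
    (["with", "only"]).foldl (fun acc keyword =>
      match PySem.List.index? bits keyword with
      | some i => acc ++ [i]          -- bits.index(keyword) appended
      | none => acc) []               -- ValueError: pass
  let extra_index : Int :=
    match PySem.List.min? keyword_indexes (fun x => x) with
    | some m => (m : Int)             -- min(keyword_indexes)
    | none => (bits.length : Int)     -- keyword_indexes empty: len(bits)
  (PySem.List.slice bits (some 1) (some extra_index), extra_index)

-- ===== PORT B =====
-- the 'for bit in bits: if bit in ('with','only'): break; head.append(bit)' loop
def pvAltHead : List String → List String
  | [] => []
  | bit :: rest => if bit = "with" ∨ bit = "only" then [] else bit :: pvAltHead rest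

def template_expressions_py_alt (bits : List String) : List String × Int :=
  let head := pvAltHead bits
  (PySem.List.slice head (some 1) none, (head.length : Int))

-- ===== PRECONDITION & SPEC =====
def Spec_template_expressions_py (bits : List String) (out : List String × Int) : Prop := out = template_expressions_py_alt bits
instance (bits : List String) (out : List String × Int) : Decidable (Spec_template_expressions_py bits out) := by unfold Spec_template_expressions_py; infer_instance

-- ===== CLAIM (what is proved, stated in full; the proofs are below) =====
def Claim_equal_template_expressions_py : Prop := ∀ (bits : List String), Dom_template_expressions_py bits → Spec_template_expressions_py bits (template_expressions_py bits)

-- ===== LEMMAS AND PROOFS =====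

-- A's extra_index, written as a function of the two first-occurrence scans
def pvAExtra (bits : List String) : Nat :=
  match PySem.List.index? bits "with", PySem.List.index? bits "only" with
  | some i, some j => min i j
  | some i, none => i
  | none, some j => j
  | none, none => bits.length

lemma pvAExtra_le (bits : List String) : pvAExtra bits ≤ bits.length := by
  unfold pvAExtra
  rcases h1 : PySem.List.index? bits "with" with _ | i <;>
    rcases h2 : PySem.List.index? bits "only" with _ | j <;> simp
  · exact le_of_lt (PySem.List.getElem_of_index?_eq_some h2).1
  · exact le_of_lt (PySem.List.getElem_of_index?_eq_some h1).1
  · exact Or.inl (le_of_lt (PySem.List.getElem_of_index?_eq_some h1).1)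

lemma pvAltHead_eq_take (bits : List String) : pvAltHead bits = bits.take (pvAExtra bits) := by
  induction bits with
  | nil => simp [pvAltHead, pvAExtra, PySem.List.index?]
  | cons b rest ih =>
    unfold pvAExtra pvAltHead
    by_cases hw : b = "with"
    · subst hw
      rw [PySem.List.index?_cons_self]
      rcases h2 : PySem.List.index? ("with" :: rest) "only" with _ | j <;> simp
    · by_cases ho : b = "only"
      · subst ho
        have hne : ("only" : String) ≠ "with" := by decide
        rw [PySem.List.index?_cons_self, PySem.List.index?_cons_of_ne rest hne]
        rcases h3 : PySem.List.index? rest "with" with _ | i <;> simp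
      · rw [PySem.List.index?_cons_of_ne rest hw, PySem.List.index?_cons_of_ne rest ho]
        unfold pvAExtra at ih
        rcases h3 : PySem.List.index? rest "with" with _ | i <;>
          rcases h4 : PySem.List.index? rest "only" with _ | j <;>
          rw [h3, h4] at ih <;>
          simp [hw, ho, ih, Nat.succ_min_succ]

lemma pvA_extra_match (bits : List String) :
    (match PySem.List.min?
        ((["with", "only"]).foldl (fun acc keyword =>
          match PySem.List.index? bits keyword with
          | some i => acc ++ [i]
          | none => acc) []) (fun x => x) with
      | some m => (m : Int)
      | none => (bits.length : Int)) = (pvAExtra bits : Int) := by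
  unfold pvAExtra
  simp only [List.foldl]
  rcases h1 : PySem.List.index? bits "with" with _ | i <;>
    rcases h2 : PySem.List.index? bits "only" with _ | j <;>
    simp [PySem.List.min?] <;> (try split_ifs) <;> (simp; try omega)

-- ===== VERDICT (by name: the statement is the Claim_ definition above) =====
theorem template_expressions_py_spec : Claim_equal_template_expressions_py := by
  intro bits _
  unfold Spec_template_expressions_py
  show template_expressions_py bits = template_expressions_py_alt bits
  unfold template_expressions_py template_expressions_py_alt
  dsimp only
  rw [pvA_extra_match, pvAltHead_eq_take]
  have hle := pvAExtra_le bits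
  congr 1
  · rw [PySem.List.slice_from_one, ← List.drop_one, List.drop_take,
        PySem.List.slice_toNat] <;> simp
  · simp [min_eq_left hle]
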